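-- pv_equiv track=rewrite | github.com/Joragasy/AI_and_Entropic_Data_Compression_training | DataCompression/compLib.py | to_bin
-- ===== SOURCE A (Python) =====
-- def to_bin(codedbin):
--     begin = codedbin[0]
--     binary = begin
--     i=1
--     while i < len(codedbin):
--         binary += str(codedbin)*i
--         reverse = lambda x : '0' if x == '1' else '1'
--         begin = reverse(binary)
--         i+=1
--     return binary
-- ===== SOURCE B (Python) =====
-- def to_bin(codedbin):
--     n = len(codedbin)
--     return codedbin[0] + codedbin * (n * (n - 1) // 2)
-- ===== Notes on version B (the rewrite author's own statement) =====
-- stated objective: simpler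
-- what changed: Replaced the accumulation while-loop (which appends i copies of the string at step i and computes a dead 'begin'/'reverse' value) with the single closed-form expression codedbin[0] + codedbin * (n*(n-1)//2).
import Mathlib
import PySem

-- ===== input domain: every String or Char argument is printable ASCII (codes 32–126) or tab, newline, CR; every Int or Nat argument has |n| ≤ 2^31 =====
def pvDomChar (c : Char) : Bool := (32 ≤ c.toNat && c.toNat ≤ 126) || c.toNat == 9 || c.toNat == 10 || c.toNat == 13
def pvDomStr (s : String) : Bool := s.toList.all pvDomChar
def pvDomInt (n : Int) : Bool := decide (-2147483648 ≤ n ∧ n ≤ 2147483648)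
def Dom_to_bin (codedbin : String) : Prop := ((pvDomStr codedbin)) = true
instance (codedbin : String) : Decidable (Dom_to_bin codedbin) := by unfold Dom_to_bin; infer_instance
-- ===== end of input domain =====

-- B replaces A's accumulation loop (with its dead 'begin'/'reverse' bookkeeping) by the closed
-- form codedbin[0] + codedbin * (n*(n-1)//2); objective: simpler.


-- ===== PORT A =====
-- literal port of A's while loop; codedbin[0] = none is Python's IndexError, excluded by Pre_
def to_bin (codedbin : String) : String :=
  let s := codedbin.toList
  match PySem.List.pyGet? s 0 with
  | none => ""   -- IndexError on the empty string (outside Pre_)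
  | some c =>
    -- state = (binary, begin); the loop 'while i < len(codedbin)' is the fold over i = 1, …, len-1
    let st := (PySem.List.pyRange 1 (s.length : Int) 1).foldl
      (fun (st : List Char × List Char) i =>
        let binary := st.1 ++ PySem.List.pyRepeat s i
        (binary, if binary = ['1'] then ['0'] else ['1']))  -- begin = reverse(binary), dead code kept
      ([c], [c])
    String.ofList st.1

-- ===== PORT B =====
def to_bin_alt (codedbin : String) : String :=
  let s := codedbin.toList
  let n : Int := s.length
  match PySem.List.pyGet? s 0 with
  | none => ""   -- IndexError on the empty string (outside Pre_)
  | some c =>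
    String.ofList (c :: PySem.List.pyRepeat s (PySem.Int.floordiv (n * (n - 1)) 2))

-- ===== PRECONDITION & SPEC =====
-- Python A raises IndexError (codedbin[0]) exactly on the empty string.
def Pre_to_bin (codedbin : String) : Prop := codedbin ≠ ""
instance (codedbin : String) : Decidable (Pre_to_bin codedbin) := by unfold Pre_to_bin; infer_instance
def pvWitness_to_bin : String := "01"

def Spec_to_bin (codedbin : String) (out : String) : Prop := out = to_bin_alt codedbin
instance (codedbin : String) (out : String) : Decidable (Spec_to_bin codedbin out) := by unfold Spec_to_bin; infer_instance

-- ===== CLAIM (what is proved, stated in full; the proofs are below) =====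
def Claim_equal_to_bin : Prop := ∀ (codedbin : String), Dom_to_bin codedbin → Pre_to_bin codedbin → Spec_to_bin codedbin (to_bin codedbin)

-- ===== LEMMAS AND PROOFS =====

-- n copies then m copies is n+m copies (nonnegative counts)
lemma pyRepeat_add {α : Type} (s : List α) (a b : Int) (ha : 0 ≤ a) (hb : 0 ≤ b) :
    PySem.List.pyRepeat s a ++ PySem.List.pyRepeat s b = PySem.List.pyRepeat s (a + b) := by
  unfold PySem.List.pyRepeat
  rw [show (a + b).toNat = a.toNat + b.toNat by omega, List.replicate_add, List.flatten_append]

-- the first component of A's fold ignores the second component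
lemma fst_foldl (s : List Char) (l : List Int) (st : List Char × List Char) :
    (l.foldl (fun (st : List Char × List Char) i =>
        (st.1 ++ PySem.List.pyRepeat s i,
         if st.1 ++ PySem.List.pyRepeat s i = ['1'] then ['0'] else ['1'])) st).1
      = l.foldl (fun a i => a ++ PySem.List.pyRepeat s i) st.1 := by
  induction l generalizing st with
  | nil => rfl
  | cons x xs ih => simp only [List.foldl_cons]; exact ih _

lemma foldl_rep (s : List Char) (acc : List Char) (n : Nat) :
    (PySem.List.pyRange 1 (n : Int) 1).foldl (fun a i => a ++ PySem.List.pyRepeat s i) acc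
      = acc ++ PySem.List.pyRepeat s (PySem.Int.floordiv ((n : Int) * ((n : Int) - 1)) 2) := by
  induction n with
  | zero =>
    rw [PySem.List.pyRange_one_eq_nil (by omega)]
    simp [PySem.List.pyRepeat, PySem.Int.floordiv]
  | succ m ih =>
    rcases Nat.eq_zero_or_pos m with hm | hm
    · subst hm
      rw [show ((0 + 1 : Nat) : Int) = 1 from by norm_num, PySem.List.pyRange_one_eq_nil (by omega)]
      simp [PySem.List.pyRepeat, PySem.Int.floordiv]
    · rw [show ((m + 1 : Nat) : Int) = (m : Int) + 1 by push_cast; ring,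
        PySem.List.pyRange_one_succ_right (by exact_mod_cast hm), List.foldl_append]
      simp only [List.foldl_cons, List.foldl_nil, ih]
      rw [List.append_assoc, pyRepeat_add s _ _ ?hnn (by exact_mod_cast Nat.zero_le m)]
      · congr 1
        have h2 : PySem.Int.floordiv ((m : Int) * ((m : Int) - 1)) 2 + (m : Int)
            = PySem.Int.floordiv (((m : Int) + 1) * (((m : Int) + 1) - 1)) 2 := by
          unfold PySem.Int.floordiv
          obtain ⟨k, hk⟩ : ∃ k : Int, (m : Int) * ((m : Int) - 1) = 2 * k := by
            rcases Int.even_or_odd (m : Int) with ⟨k, hh⟩ | ⟨k, hh⟩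
            · exact ⟨k * ((m : Int) - 1), by rw [hh]; ring⟩
            · exact ⟨(m : Int) * k, by rw [hh]; ring⟩
          rw [show ((m : Int) + 1) * (((m : Int) + 1) - 1) = 2 * (k + m) by linear_combination hk,
            hk, Int.mul_fdiv_cancel_left _ (by norm_num), Int.mul_fdiv_cancel_left _ (by norm_num)]
        rw [h2]
      case hnn =>
        unfold PySem.Int.floordiv
        exact Int.fdiv_nonneg (by nlinarith [Int.natCast_nonneg m]) (by norm_num)

-- ===== VERDICT (by name: the statement is the Claim_ definition above) =====
theorem to_bin_spec : Claim_equal_to_bin := by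
  intro codedbin _ hpre
  unfold Spec_to_bin to_bin to_bin_alt
  have hne : codedbin.toList ≠ [] := by
    intro h
    exact hpre (by simpa using congrArg String.ofList h)
  cases hsl : codedbin.toList with
  | nil => exact absurd hsl hne
  | cons c cs =>
    simp only [PySem.List.pyGet?_zero, List.getElem?_cons_zero]
    rw [fst_foldl, show ((c :: cs).length : Int) = ((c :: cs).length : Nat) by norm_cast,
      foldl_rep]
    simp
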